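-- pv_equiv track=rewrite | github.com/hattum/ijwit | Final/algorithms_hattum/priority_miro.py | best_scoorders
-- ===== SOURCE A (Python) =====
-- def scoreH(coordsmatch):
--     scoreH = 0
--     scoreC = 0
--     for i in range(len(coordsmatch)):
--         current = coordsmatch[i][1]
--         for j in range(i+2, len(coordsmatch)):
--             next = coordsmatch[j][1]
--             if current[0] == next[0] and (current[1] == next[1] - 1 or current[1] == next[1] +1) and coordsmatch[i][0] == "H" and (coordsmatch[j][0] == "H" or coordsmatch[j][0] == "C"):
--                 scoreH += -1
--             elif current[0] == next[0] and (current[1] == next[1] - 1 or current[1] == next[1] +1) and coordsmatch[i][0] == "C" and coordsmatch[j][0] == "C":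
--                 scoreC += -5
--             elif current[0] == next[0] and (current[1] == next[1] - 1 or current[1] == next[1] +1) and coordsmatch[i][0] == "C" and coordsmatch[j][0] == "H":
--                 scoreC += -1
--             elif current[1] == next[1] and (current[0] == next[0] - 1 or current[0] == next[0] +1) and coordsmatch[i][0] == "H" and (coordsmatch[j][0] == "H" or coordsmatch[j][0] == "C"):
--                 scoreH += -1
--             elif current[1] == next[1] and (current[0] == next[0] - 1 or current[0] == next[0] +1) and coordsmatch[i][0] == "C" and coordsmatch[j][0] == "C":
--                 scoreC += -5
--             elif current[1] == next[1] and (current[0] == next[0] - 1 or current[0] == next[0] +1) and coordsmatch[i][0] == "C" and coordsmatch[j][0] == "H":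
--                 scoreC += -1
--     return scoreH + scoreC
--
-- def best_scoorders(paths):
--     scoorders = []
--     scoreX = 0
--     scores = []
--     for path in paths:
--         score = scoreH(path)
--         if score <= scoreX:
--             scoorders.append(path)
--             scores.append(score)
--             scoreX = score
--     return scoorders, scores
-- ===== SOURCE B (Python) =====
-- def _w(t, u):
--     if t == "C" and u == "C":
--         return -5
--     if t in ("H", "C") and u in ("H", "C"):
--         return -1
--     return 0
--
-- def _score(path):
--     # no pair (i, j) with j >= i + 2 exists in a path shorter than 3
--     if len(path) < 3:
--         return 0
--     items = [((c[0], c[1]), (i, t)) for i, (t, c) in enumerate(path)]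
--     pos = {}
--     for k, v in items:
--         pos.setdefault(k, []).append(v)
--     total = 0
--     for i, (t, c) in enumerate(path):
--         x, y = c[0], c[1]
--         for nb in ((x + 1, y), (x - 1, y), (x, y + 1), (x, y - 1)):
--             for j, u in pos.get(nb, ()):
--                 if j >= i + 2:
--                     total += _w(t, u)
--     return total
--
-- def best_scoorders(paths):
--     scoorders = []
--     scores = []
--     best = 0
--     for path in paths:
--         s = _score(path)
--         if s <= best:
--             scoorders.append(path)
--             scores.append(s)
--             best = s
--     return scoorders, scores
-- ===== Notes on version B (the rewrite author's own statement) =====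
-- stated objective: alternative
-- what changed: B replaces A's all-pairs inner scan per path with a hash index of grid coordinates built once per path: each cell looks up only its four neighbour cells and sums the same type-weighted contributions for occupants at index distance >= 2 (intended as faster, but a timing run measured only ~1.26x at the largest size, so no speed is claimed).
import Mathlib
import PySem

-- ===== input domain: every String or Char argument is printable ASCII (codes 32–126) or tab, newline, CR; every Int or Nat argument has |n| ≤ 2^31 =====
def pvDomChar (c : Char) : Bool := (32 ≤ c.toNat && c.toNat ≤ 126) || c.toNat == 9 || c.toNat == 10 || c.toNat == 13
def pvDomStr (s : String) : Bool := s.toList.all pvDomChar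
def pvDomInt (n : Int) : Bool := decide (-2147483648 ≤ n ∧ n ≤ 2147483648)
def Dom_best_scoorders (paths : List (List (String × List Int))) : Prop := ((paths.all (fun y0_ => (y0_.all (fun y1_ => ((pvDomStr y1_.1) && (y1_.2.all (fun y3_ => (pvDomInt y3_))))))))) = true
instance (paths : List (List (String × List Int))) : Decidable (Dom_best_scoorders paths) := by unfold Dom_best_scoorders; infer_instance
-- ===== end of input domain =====

-- B replaces A's all-pairs scan per path by a hash index of grid coordinates, checking only
-- each cell's four neighbour cells (objective: alternative; not measurably faster on the
-- timed inputs).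

-- ===== PORT A =====
-- Index accesses use pyGetD with a default; the default is only reachable on inputs
-- excluded by Pre_best_scoorders (where the Python raises IndexError).
def scoreHA (coordsmatch : List (String × List Int)) : Int :=
  let n : Int := PySem.List.len coordsmatch
  let s :=
    (PySem.List.pyRange 0 n 1).foldl (fun (s : Int × Int) i =>
      let ei := PySem.List.pyGetD coordsmatch i ("", [])
      let current := ei.2
      (PySem.List.pyRange (i + 2) n 1).foldl (fun (s : Int × Int) j =>
        let ej := PySem.List.pyGetD coordsmatch j ("", [])
        let next := ej.2
        let c0 := PySem.List.pyGetD current 0 0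
        let c1 := PySem.List.pyGetD current 1 0
        let n0 := PySem.List.pyGetD next 0 0
        let n1 := PySem.List.pyGetD next 1 0
        if c0 = n0 ∧ (c1 = n1 - 1 ∨ c1 = n1 + 1) ∧ ei.1 = "H" ∧ (ej.1 = "H" ∨ ej.1 = "C") then (s.1 + -1, s.2)
        else if c0 = n0 ∧ (c1 = n1 - 1 ∨ c1 = n1 + 1) ∧ ei.1 = "C" ∧ ej.1 = "C" then (s.1, s.2 + -5)
        else if c0 = n0 ∧ (c1 = n1 - 1 ∨ c1 = n1 + 1) ∧ ei.1 = "C" ∧ ej.1 = "H" then (s.1, s.2 + -1)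
        else if c1 = n1 ∧ (c0 = n0 - 1 ∨ c0 = n0 + 1) ∧ ei.1 = "H" ∧ (ej.1 = "H" ∨ ej.1 = "C") then (s.1 + -1, s.2)
        else if c1 = n1 ∧ (c0 = n0 - 1 ∨ c0 = n0 + 1) ∧ ei.1 = "C" ∧ ej.1 = "C" then (s.1, s.2 + -5)
        else if c1 = n1 ∧ (c0 = n0 - 1 ∨ c0 = n0 + 1) ∧ ei.1 = "C" ∧ ej.1 = "H" then (s.1, s.2 + -1)
        else s) s) ((0 : Int), (0 : Int))
  s.1 + s.2

def best_scoorders (paths : List (List (String × List Int))) : (List (List (String × List Int))) × List Int :=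
  let st := paths.foldl
    (fun (st : List (List (String × List Int)) × Int × List Int) path =>
      let score := scoreHA path
      if score ≤ st.2.1 then (st.1 ++ [path], score, st.2.2 ++ [score]) else st)
    ([], 0, [])
  (st.1, st.2.2)

-- ===== PORT B =====
def wB (t u : String) : Int :=
  if t = "C" ∧ u = "C" then -5
  else if (t = "H" ∨ t = "C") ∧ (u = "H" ∨ u = "C") then -1
  else 0

def keyB (c : List Int) : Int × Int := (PySem.List.pyGetD c 0 0, PySem.List.pyGetD c 1 0)

def scoreB (path : List (String × List Int)) : Int :=
  if PySem.List.len path < 3 then 0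
  else
    let items : List ((Int × Int) × (Int × String)) :=
      (PySem.List.enumerate path 0).map (fun q => (keyB q.2.2, (q.1, q.2.1)))
    let pos : PySem.Dict (Int × Int) (List (Int × String)) :=
      items.foldl (fun d p => d.modify p.1 [] (· ++ [p.2])) PySem.Dict.empty
    (PySem.List.enumerate path 0).foldl (fun (total : Int) p =>
      let x := PySem.List.pyGetD p.2.2 0 0
      let y := PySem.List.pyGetD p.2.2 1 0
      [(x + 1, y), (x - 1, y), (x, y + 1), (x, y - 1)].foldl (fun total nb =>
        (pos.getD nb []).foldl (fun total ju =>
          if ju.1 ≥ p.1 + 2 then total + wB p.2.1 ju.2 else total) total) total) 0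

def best_scoorders_alt (paths : List (List (String × List Int))) : (List (List (String × List Int))) × List Int :=
  let st := paths.foldl
    (fun (st : List (List (String × List Int)) × Int × List Int) path =>
      let score := scoreB path
      if score ≤ st.2.1 then (st.1 ++ [path], score, st.2.2 ++ [score]) else st)
    ([], 0, [])
  (st.1, st.2.2)

-- ===== PRECONDITION & SPEC =====
-- Pre_ excludes inputs containing a coordinate list with fewer than two components inside a
-- path long enough to have index pairs (i, j) with j ≥ i+2: on those A almost always raises
-- IndexError; in the sole corner where A still returns (a length-3 path whose middle entry is
-- short and never compared) B's coordinate indexing raises, so it is excluded too.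
def Pre_best_scoorders (paths : List (List (String × List Int))) : Prop :=
  ∀ path ∈ paths, path.length ≤ 2 ∨ ∀ q ∈ path, 2 ≤ q.2.length
instance (paths : List (List (String × List Int))) : Decidable (Pre_best_scoorders paths) := by
  unfold Pre_best_scoorders; infer_instance

def pvWitness_best_scoorders : (List (List (String × List Int))) :=
  [[("H", [0, 0]), ("H", [0, 1]), ("H", [1, 1]), ("C", [1, 0])]]

def Spec_best_scoorders (paths : List (List (String × List Int))) (out : (List (List (String × List Int))) × List Int) : Prop := out = best_scoorders_alt paths
instance (paths : List (List (String × List Int))) (out : (List (List (String × List Int))) × List Int) : Decidable (Spec_best_scoorders paths out) := by unfold Spec_best_scoorders; infer_instance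

-- ===== CLAIM (what is proved, stated in full; the proofs are below) =====
def Claim_equal_best_scoorders : Prop := ∀ (paths : List (List (String × List Int))), Dom_best_scoorders paths → Pre_best_scoorders paths → Spec_best_scoorders paths (best_scoorders paths)

-- ===== LEMMAS AND PROOFS =====

-- the entry A reads at index i (the shared default of the two ports)
def gA (cm : List (String × List Int)) (i : Int) : String × List Int :=
  PySem.List.pyGetD cm i ("", [])

-- A's per-pair contribution, as the (scoreH, scoreC) increment
def chain2 (e f : String × List Int) : Int × Int :=
  let c0 := PySem.List.pyGetD e.2 0 0
  let c1 := PySem.List.pyGetD e.2 1 0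
  let n0 := PySem.List.pyGetD f.2 0 0
  let n1 := PySem.List.pyGetD f.2 1 0
  if c0 = n0 ∧ (c1 = n1 - 1 ∨ c1 = n1 + 1) ∧ e.1 = "H" ∧ (f.1 = "H" ∨ f.1 = "C") then (-1, 0)
  else if c0 = n0 ∧ (c1 = n1 - 1 ∨ c1 = n1 + 1) ∧ e.1 = "C" ∧ f.1 = "C" then (0, -5)
  else if c0 = n0 ∧ (c1 = n1 - 1 ∨ c1 = n1 + 1) ∧ e.1 = "C" ∧ f.1 = "H" then (0, -1)
  else if c1 = n1 ∧ (c0 = n0 - 1 ∨ c0 = n0 + 1) ∧ e.1 = "H" ∧ (f.1 = "H" ∨ f.1 = "C") then (-1, 0)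
  else if c1 = n1 ∧ (c0 = n0 - 1 ∨ c0 = n0 + 1) ∧ e.1 = "C" ∧ f.1 = "C" then (0, -5)
  else if c1 = n1 ∧ (c0 = n0 - 1 ∨ c0 = n0 + 1) ∧ e.1 = "C" ∧ f.1 = "H" then (0, -1)
  else (0, 0)

def cval (e f : String × List Int) : Int := (chain2 e f).1 + (chain2 e f).2

-- B's neighbour list of an entry
def nbsB (e : String × List Int) : List (Int × Int) :=
  let x := PySem.List.pyGetD e.2 0 0
  let y := PySem.List.pyGetD e.2 1 0
  [(x + 1, y), (x - 1, y), (x, y + 1), (x, y - 1)]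

theorem sum_filter_map {α : Type} (l : List α) (p : α → Bool) (v : α → Int) :
    ((l.filter p).map v).sum = (l.map (fun x => if p x then v x else 0)).sum := by
  induction l with
  | nil => simp
  | cons a l ih =>
    by_cases h : p a <;> simp [h, ih]

theorem sum_exchange {α κ : Type} [DecidableEq κ] (nbs : List κ) (hn : nbs.Nodup)
    (l : List α) (key : α → κ) (g : α → Int) :
    (nbs.map (fun nb => (l.map (fun q => if key q = nb then g q else 0)).sum)).sum
      = (l.map (fun q => if key q ∈ nbs then g q else 0)).sum := by
  induction nbs with
  | nil => simp
  | cons nb rest ih =>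
    rcases List.nodup_cons.mp hn with ⟨hnb, hrest⟩
    simp only [List.map_cons, List.sum_cons, ih hrest]
    rw [← PySem.List.sum_map_add_int]
    apply congrArg
    apply List.map_congr_left
    intro q _
    by_cases h : key q = nb
    · rw [h] at *
      simp [hnb]
    · simp [h]

-- innermost+middle+outer folds to nested sums

theorem sum_map_zero_of_all (l : List Int) (F : Int → Int) (h : ∀ j ∈ l, F j = 0) :
    (l.map F).sum = 0 := by
  apply List.sum_eq_zero
  intro x hx
  rw [List.mem_map] at hx
  obtain ⟨j, hj, rfl⟩ := hx
  exact h j hj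

theorem nbsB_nodup (e : String × List Int) : (nbsB e).Nodup := by
  simp [nbsB, List.nodup_cons, Prod.mk.injEq]
  omega

theorem scoreHA_eq_sum (cm : List (String × List Int)) :
    scoreHA cm =
      ((PySem.List.pyRange 0 (PySem.List.len cm) 1).map (fun i =>
        ((PySem.List.pyRange (i + 2) (PySem.List.len cm) 1).map (fun j =>
          cval (gA cm i) (gA cm j))).sum)).sum := by
  unfold scoreHA
  dsimp only
  rw [PySem.List.foldl_congr_mem _ _
    (fun (s : Int × Int) i =>
      (s.1 + ((PySem.List.pyRange (i + 2) (PySem.List.len cm) 1).map (fun j => (chain2 (gA cm i) (gA cm j)).1)).sum,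
       s.2 + ((PySem.List.pyRange (i + 2) (PySem.List.len cm) 1).map (fun j => (chain2 (gA cm i) (gA cm j)).2)).sum))
    _ ?_]
  · rw [PySem.List.foldl_prod_mk
      (f := fun a i => a + ((PySem.List.pyRange (i + 2) (PySem.List.len cm) 1).map (fun j => (chain2 (gA cm i) (gA cm j)).1)).sum)
      (g := fun b i => b + ((PySem.List.pyRange (i + 2) (PySem.List.len cm) 1).map (fun j => (chain2 (gA cm i) (gA cm j)).2)).sum)]
    rw [PySem.List.foldl_add, PySem.List.foldl_add]
    simp [cval]
  · intro acc i _
    rw [PySem.List.foldl_congr_mem _ _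
      (fun (s : Int × Int) j => (s.1 + (chain2 (gA cm i) (gA cm j)).1, s.2 + (chain2 (gA cm i) (gA cm j)).2)) _
      ?hb]
    case hb =>
      intro s j _
      unfold chain2 gA
      dsimp only
      split_ifs <;> simp
    obtain ⟨a, b⟩ := acc
    rw [PySem.List.foldl_prod_mk
      (f := fun a j => a + (chain2 (gA cm i) (gA cm j)).1)
      (g := fun b j => b + (chain2 (gA cm i) (gA cm j)).2)]
    rw [PySem.List.foldl_add, PySem.List.foldl_add]

theorem scoreB_sums (path : List (String × List Int)) (h : ¬ PySem.List.len path < 3) :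
    scoreB path =
      ((PySem.List.enumerate path 0).map (fun p =>
        ((nbsB p.2).map (fun nb =>
          ((((PySem.List.enumerate path 0).map (fun q => (keyB q.2.2, (q.1, q.2.1)))).foldl
              (fun (d : PySem.Dict (Int × Int) (List (Int × String))) p => d.modify p.1 [] (· ++ [p.2]))
              PySem.Dict.empty).getD nb [] |>.map (fun ju =>
                if ju.1 ≥ p.1 + 2 then wB p.2.1 ju.2 else 0)).sum)).sum)).sum := by
  unfold scoreB
  rw [if_neg h]
  dsimp only
  rw [PySem.List.foldl_congr_mem _ _
    (fun (total : Int) p =>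
      total + ((nbsB p.2).map (fun nb =>
        ((((PySem.List.enumerate path 0).map (fun q => (keyB q.2.2, (q.1, q.2.1)))).foldl
            (fun (d : PySem.Dict (Int × Int) (List (Int × String))) p => d.modify p.1 [] (· ++ [p.2]))
            PySem.Dict.empty).getD nb [] |>.map (fun ju =>
              if ju.1 ≥ p.1 + 2 then wB p.2.1 ju.2 else 0)).sum)).sum) _ ?hb]
  · rw [PySem.List.foldl_add]
    simp
  case hb =>
    intro total p _
    unfold nbsB
    dsimp only
    rw [PySem.List.foldl_congr_mem _ _
      (fun (t : Int) nb =>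
        t + ((((PySem.List.enumerate path 0).map (fun q => (keyB q.2.2, (q.1, q.2.1)))).foldl
            (fun (d : PySem.Dict (Int × Int) (List (Int × String))) p => d.modify p.1 [] (· ++ [p.2]))
            PySem.Dict.empty).getD nb [] |>.map (fun ju =>
              if ju.1 ≥ p.1 + 2 then wB p.2.1 ju.2 else 0)).sum) _ ?hc]
    · rw [PySem.List.foldl_add]
    case hc =>
      intro t nb _
      rw [PySem.List.foldl_congr_mem _ _
        (fun (t : Int) ju => t + (if ju.1 ≥ p.1 + 2 then wB p.2.1 ju.2 else 0)) _ ?hd]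
      · rw [PySem.List.foldl_add]
      case hd =>
        intro t ju _
        by_cases hc : ju.1 ≥ p.1 + 2 <;> simp [hc]

theorem scoreB_eq_sum (path : List (String × List Int)) (h : ¬ PySem.List.len path < 3) :
    scoreB path =
      ((PySem.List.pyRange 0 (PySem.List.len path) 1).map (fun i =>
        ((PySem.List.pyRange (i + 2) (PySem.List.len path) 1).map (fun j =>
          if keyB (gA path j).2 ∈ nbsB (gA path i) then wB (gA path i).1 (gA path j).1 else 0)).sum)).sum := by
  rw [scoreB_sums path h]
  rw [PySem.List.enumerate_eq_map_pyRange path ("", [])]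
  simp only [PySem.Dict.getD_foldl_modify_append, PySem.Dict.getD_empty, List.nil_append,
    List.filter_map, List.map_map, Function.comp_def]
  simp only [sum_filter_map, beq_iff_eq]
  apply congrArg
  apply List.map_congr_left
  intro i hi
  have hi0 : 0 ≤ i := (PySem.List.mem_pyRange_one.mp hi).1
  have hn3 : ¬ PySem.List.len path < 3 := h
  have hn0 : (0 : Int) ≤ PySem.List.len path := by
    simp [PySem.List.len_eq]
  rw [sum_exchange _ (nbsB_nodup _) _ (fun q => keyB (PySem.List.pyGetD path q ("", [])).2)
      (fun q => if (q : Int) ≥ i + 2 then wB (PySem.List.pyGetD path i ("", [])).1 (PySem.List.pyGetD path q ("", [])).1 else 0)]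
  rw [PySem.List.pyRange_one_append 0 (min (i + 2) (PySem.List.len path)) (PySem.List.len path)
      (by omega) (by omega)]
  rw [List.map_append, List.sum_append]
  rw [sum_map_zero_of_all _ _ ?h0, zero_add]
  case h0 =>
    intro j hj
    have := PySem.List.mem_pyRange_one.mp hj
    have hjlt : ¬ j ≥ i + 2 := by omega
    simp [hjlt]
  by_cases hc : i + 2 ≤ PySem.List.len path
  · rw [min_eq_left hc]
    refine congrArg List.sum (List.map_congr_left ?_)
    intro j hj
    have := PySem.List.mem_pyRange_one.mp hj
    have hge : j ≥ i + 2 := by omega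
    simp [gA, hge]
  · rw [min_eq_right (by omega), PySem.List.pyRange_one_eq_nil (by omega),
      PySem.List.pyRange_one_eq_nil (by omega)]
    simp

theorem cval_eq_ite (e f : String × List Int) :
    cval e f = if keyB f.2 ∈ nbsB e then wB e.1 f.1 else 0 := by
  unfold cval chain2 nbsB keyB wB
  simp only [List.mem_cons, List.not_mem_nil, or_false, Prod.mk.injEq]
  by_cases h1 : e.1 = "H" <;> by_cases h2 : e.1 = "C" <;>
    by_cases h3 : f.1 = "H" <;> by_cases h4 : f.1 = "C" <;>
    simp only [h1, h2, h3, h4] <;> simp_all <;> split_ifs <;> omega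

theorem score_eq (path : List (String × List Int)) : scoreHA path = scoreB path := by
  by_cases h : PySem.List.len path < 3
  · rw [scoreHA_eq_sum]
    unfold scoreB
    rw [if_pos h]
    apply sum_map_zero_of_all
    intro i hi
    have hi' := PySem.List.mem_pyRange_one.mp hi
    have hlen : PySem.List.len path = (path.length : Int) := by
      simp [PySem.List.len_eq]
    rw [PySem.List.pyRange_one_eq_nil (by omega)]
    simp
  · rw [scoreHA_eq_sum, scoreB_eq_sum path h]
    simp only [cval_eq_ite]

-- ===== VERDICT (by name: the statement is the Claim_ definition above) =====
theorem best_scoorders_spec : Claim_equal_best_scoorders := by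
  intro paths _ _
  unfold Spec_best_scoorders
  simp only [best_scoorders, best_scoorders_alt, score_eq]
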